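-- pv_equiv track=rewrite | github.com/jakvbm1/letter-recognition-using-knn | csv_creation.py | xed
-- ===== SOURCE A (Python) =====
-- def xed(np_img):
--     edge_count = 0
--     position_count = 0
--     for index, row in enumerate(np_img):
--         prev_pixel = 0
--         for pixel in row:
--             if pixel == 255 and prev_pixel < 255:
--                 edge_count += 1
--                 position_count += len(np_img) - index
--             prev_pixel = pixel
--         if prev_pixel < 255:  # jezeli ostatni pixel jest "on" to doliczam tez krawedz z granica
--             edge_count += 1
--             position_count += len(np_img) - index
--     return edge_count, position_count
-- ===== SOURCE B (Python) =====
-- def xed(np_img):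
--     # Dual view: instead of A's forward scan tracking prev_pixel and weighting by
--     # len(np_img)-index, scan each row RIGHT-TO-LEFT counting pixels <255 that are
--     # followed by a 255 (or the row boundary), and accumulate position_count as a
--     # running cumulative sum of edge_total (no index/len arithmetic).
--     edge_total = 0
--     pos_total = 0
--     for row in np_img:
--         e = 1 if (not row or row[0] == 255) else 0
--         nxt = 255
--         for p in reversed(row):
--             if p < 255 and nxt == 255:
--                 e += 1
--             nxt = p
--         edge_total += e
--         pos_total += edge_total
--     return edge_total, pos_total
-- ===== Notes on version B (the rewrite author's own statement) =====
-- stated objective: alternative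
-- what changed: A scans each row left-to-right carrying prev_pixel to count rises into 255 and weights each edge by len(np_img)-index; B scans each row right-to-left carrying the NEXT pixel, counting the dual events (a pixel <255 followed by 255 or the row boundary, plus a leading-255 edge), and obtains position_count with no index/len arithmetic at all, as a running cumulative sum of edge_total over the rows.
import Mathlib
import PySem

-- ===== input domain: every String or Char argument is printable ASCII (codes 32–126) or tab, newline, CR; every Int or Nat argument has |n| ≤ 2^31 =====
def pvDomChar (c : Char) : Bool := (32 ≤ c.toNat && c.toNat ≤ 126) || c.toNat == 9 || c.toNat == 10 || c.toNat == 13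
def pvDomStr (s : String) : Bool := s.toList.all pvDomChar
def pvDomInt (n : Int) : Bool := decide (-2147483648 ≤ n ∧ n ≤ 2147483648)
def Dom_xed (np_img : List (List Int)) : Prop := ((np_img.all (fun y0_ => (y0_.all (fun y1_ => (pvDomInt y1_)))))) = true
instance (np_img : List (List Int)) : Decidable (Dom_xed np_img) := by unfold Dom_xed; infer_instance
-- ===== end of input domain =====

-- B scans rows right-to-left carrying the next pixel (the dual of A's prev-pixel scan)
-- and accumulates position_count as a running cumulative sum of edge_total, with no
-- index/len arithmetic (alternative decomposition, same cost).

-- ===== PORT A =====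
-- literal port of A: outer loop over enumerate(np_img); inner loop carries (edge_count, position_count, prev_pixel)
def xed (np_img : List (List Int)) : Int × Int :=
  let n : Int := np_img.length
  (PySem.List.enumerate np_img).foldl
    (fun (acc : Int × Int) (ir : Int × List Int) =>
      let st := ir.2.foldl
        (fun (s : Int × Int × Int) (pixel : Int) =>
          if pixel = 255 ∧ s.2.2 < 255 then (s.1 + 1, s.2.1 + (n - ir.1), pixel)
          else (s.1, s.2.1, pixel))
        (acc.1, acc.2, 0)
      if st.2.2 < 255 then (st.1 + 1, st.2.1 + (n - ir.1)) else (st.1, st.2.1))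
    (0, 0)

-- ===== PORT B =====
-- literal port of Source B: per row, e starts at 1 iff row is empty or starts with 255;
-- then fold over reversed(row) carrying (e, nxt) with nxt initialised to 255;
-- outer loop accumulates (edge_total, pos_total) with pos_total += edge_total.
def xed_alt (np_img : List (List Int)) : Int × Int :=
  np_img.foldl
    (fun (acc : Int × Int) (row : List Int) =>
      let e0 : Int := if row = [] ∨ row.headD 0 = 255 then 1 else 0
      let st := row.reverse.foldl
        (fun (s : Int × Int) (p : Int) =>
          (if p < 255 ∧ s.2 = 255 then s.1 + 1 else s.1, p)) (e0, 255)
      (acc.1 + st.1, acc.2 + (acc.1 + st.1)))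
    (0, 0)

-- ===== PRECONDITION & SPEC =====
def Spec_xed (np_img : List (List Int)) (out : Int × Int) : Prop := out = xed_alt np_img
instance (np_img : List (List Int)) (out : Int × Int) : Decidable (Spec_xed np_img out) := by unfold Spec_xed; infer_instance

-- ===== CLAIM (what is proved, stated in full; the proofs are below) =====
def Claim_equal_xed : Prop := ∀ (np_img : List (List Int)), Dom_xed np_img → Spec_xed np_img (xed np_img)

-- ===== LEMMAS AND PROOFS =====

-- A-side recursive characterisation: rises into 255 with carried prev, last pixel
def cntFrom : List Int → Int → Int
  | [], _ => 0
  | a :: row, v => (if a = 255 ∧ v < 255 then 1 else 0) + cntFrom row a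

def lastD : List Int → Int → Int
  | [], v => v
  | a :: row, _ => lastD row a

-- per-row edge count in A's terms
def eRow (r : List Int) : Int := cntFrom r 0 + (if lastD r 0 < 255 then 1 else 0)

def sumE : List (List Int) → Int
  | [] => 0
  | r :: rs => eRow r + sumE rs

def sumP (n : Int) : List (List Int) → Int → Int
  | [], _ => 0
  | r :: rs, k => eRow r * (n - k) + sumP n rs (k + 1)

-- B-side recursive characterisation: right-to-left count with carried next pixel v
def c2v : List Int → Int → Int
  | [], _ => 0
  | p :: t, v => (if p < 255 ∧ t.headD v = 255 then 1 else 0) + c2v t v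

lemma innerA (n idx : Int) : ∀ (row : List Int) (v e p : Int),
    row.foldl
      (fun (s : Int × Int × Int) (pixel : Int) =>
        if pixel = 255 ∧ s.2.2 < 255 then (s.1 + 1, s.2.1 + (n - idx), pixel)
        else (s.1, s.2.1, pixel)) (e, p, v)
    = (e + cntFrom row v, p + (n - idx) * cntFrom row v, lastD row v) := by
  intro row
  induction row with
  | nil => intro v e p; simp [cntFrom, lastD]
  | cons a row ih =>
    intro v e p
    simp only [List.foldl_cons, cntFrom, lastD]
    split_ifs with h <;> rw [ih] <;> simp only [Prod.mk.injEq] <;>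
      exact ⟨by ring, by ring, trivial⟩

lemma outerA (n : Int) : ∀ (rs : List (List Int)) (k e p : Int),
    (PySem.List.enumerate rs k).foldl
      (fun (acc : Int × Int) (ir : Int × List Int) =>
        let st := ir.2.foldl
          (fun (s : Int × Int × Int) (pixel : Int) =>
            if pixel = 255 ∧ s.2.2 < 255 then (s.1 + 1, s.2.1 + (n - ir.1), pixel)
            else (s.1, s.2.1, pixel))
          (acc.1, acc.2, 0)
        if st.2.2 < 255 then (st.1 + 1, st.2.1 + (n - ir.1)) else (st.1, st.2.1))
      (e, p)
    = (e + sumE rs, p + sumP n rs k) := by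
  intro rs
  induction rs with
  | nil => intro k e p; simp [PySem.List.enumerate_nil, sumE, sumP]
  | cons r rs ih =>
    intro k e p
    rw [PySem.List.enumerate_cons, List.foldl_cons]
    simp only [innerA n k r 0 e p]
    split_ifs with h
    · rw [ih]; simp only [sumE, sumP, eRow, if_pos h, Prod.mk.injEq]; exact ⟨by ring, by ring⟩
    · rw [ih]; simp only [sumE, sumP, eRow, if_neg h, Prod.mk.injEq]; exact ⟨by ring, by ring⟩

-- B's inner reversed fold computes (e0 + c2v row 255, headD row 255)
lemma innerB : ∀ (row : List Int) (e v : Int),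
    row.foldr
      (fun (p : Int) (s : Int × Int) =>
        (if p < 255 ∧ s.2 = 255 then s.1 + 1 else s.1, p)) (e, v)
    = (e + c2v row v, row.headD v) := by
  intro row
  induction row with
  | nil => intro e v; simp [c2v]
  | cons p t ih =>
    intro e v
    simp only [List.foldr_cons, ih, c2v, List.headD_cons]
    split_ifs with h <;> simp only [Prod.mk.injEq] <;> exact ⟨by ring, trivial⟩

-- key duality: left-to-right rise count with carried prev v = right-to-left count
-- with sentinel 255 plus the head/boundary term
lemma dual : ∀ (row : List Int) (v : Int),
    (if v < 255 ∧ row.headD 255 = 255 then 1 else 0) + c2v row 255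
      = cntFrom row v + (if lastD row v < 255 then 1 else 0) := by
  intro row
  induction row with
  | nil => intro v; simp [c2v, cntFrom, lastD]
  | cons p t ih =>
    intro v
    simp only [List.headD_cons, c2v, cntFrom, lastD]
    have := ih p
    split_ifs at * <;> omega

lemma e0_eq (row : List Int) :
    (if row = [] ∨ row.headD 0 = 255 then (1:Int) else 0)
      = (if (0:Int) < 255 ∧ row.headD 255 = 255 then 1 else 0) := by
  cases row with
  | nil => simp
  | cons p t => simp

-- per-row agreement: B's row value equals A's eRow
lemma rowB_eq (row : List Int) :
    (if row = [] ∨ row.headD 0 = 255 then (1:Int) else 0) + c2v row 255 = eRow row := by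
  rw [e0_eq, dual, eRow]

-- shifting the running index of sumP
lemma sumP_shift (n : Int) : ∀ (rs : List (List Int)) (k : Int),
    sumP n rs (k + 1) = sumP (n - 1) rs k := by
  intro rs
  induction rs with
  | nil => intro k; simp [sumP]
  | cons r rs ih =>
    intro k
    simp only [sumP, ih]
    ring_nf

-- B's outer fold with the per-row value abstracted: running cumulative sum = weighted sum
lemma outerG : ∀ (rs : List (List Int)) (e p : Int),
    rs.foldl
      (fun (acc : Int × Int) (row : List Int) =>
        (acc.1 + eRow row, acc.2 + (acc.1 + eRow row)))
      (e, p)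
    = (e + sumE rs, p + sumP (rs.length : Int) rs 0 + (rs.length : Int) * e) := by
  intro rs
  induction rs with
  | nil => intro e p; simp [sumE, sumP]
  | cons r rs ih =>
    intro e p
    rw [List.foldl_cons, ih]
    have hsh : sumP ((rs.length : Int) + 1) rs 1 = sumP ((rs.length : Int)) rs 0 := by
      have := sumP_shift ((rs.length : Int) + 1) rs 0
      simpa using this
    simp only [sumE, sumP, List.length_cons, Prod.mk.injEq]
    refine ⟨by ring, ?_⟩
    push_cast
    rw [hsh]
    ring

-- the port's fold body computes exactly that (inner reversed fold discharged)
lemma bodyB_eq :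
    (fun (acc : Int × Int) (row : List Int) =>
      let e0 : Int := if row = [] ∨ row.headD 0 = 255 then 1 else 0
      let st := row.reverse.foldl
        (fun (s : Int × Int) (q : Int) =>
          (if q < 255 ∧ s.2 = 255 then s.1 + 1 else s.1, q)) (e0, 255)
      (acc.1 + st.1, acc.2 + (acc.1 + st.1)))
    = (fun (acc : Int × Int) (row : List Int) =>
        (acc.1 + eRow row, acc.2 + (acc.1 + eRow row))) := by
  funext acc row
  simp only [List.foldl_reverse]
  rw [innerB row _ 255, ← rowB_eq row]

-- ===== VERDICT (by name: the statement is the Claim_ definition above) =====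
theorem xed_spec : Claim_equal_xed := by
  intro np_img _
  unfold Spec_xed xed xed_alt
  simp only []
  rw [outerA, bodyB_eq, outerG]
  simp
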